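-- pv_equiv track=rewrite | github.com/hanjo-plays/accent-benchmark | eval/scripts/build_splits_from_csv_test.py | make_speaker_ids
-- ===== SOURCE A (Python) =====
-- from collections import defaultdict
--
-- def make_speaker_ids(rows):
--     """
--     If you don't have a true speaker column, synthesize stable speaker ids
--     per (l1,state,gender) with a counter to avoid collisions.
--     """
--     ctr = defaultdict(int)
--     spk_list = []
--     for r in rows:
--         l1 = (r.get("primary_language") or "").strip() or "UNK"
--         st = (r.get("native_place_state") or "").strip() or "UNK"
--         gd = (r.get("gender") or "").strip() or "U"
--         key = (l1, st, gd)
--         ctr[key] += 1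
--         spk = f"SPK_{l1}_{st}_{ctr[key]:04d}"
--         spk_list.append(spk)
--     return spk_list
-- ===== SOURCE B (Python) =====
-- def make_speaker_ids(rows):
--     """Group-then-scatter: map rows to normalized keys, build an index of the
--     positions of each key, then for each group write ids numbered 1,2,...
--     back into a preallocated output list."""
--     def key(r):
--         l1 = (r.get("primary_language") or "").strip() or "UNK"
--         st = (r.get("native_place_state") or "").strip() or "UNK"
--         gd = (r.get("gender") or "").strip() or "U"
--         return (l1, st, gd)
--     keys = [key(r) for r in rows]
--     groups = {}
--     for i, k in enumerate(keys):
--         groups.setdefault(k, []).append(i)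
--     out = [""] * len(keys)
--     for (l1, st, gd), idxs in groups.items():
--         for n, i in enumerate(idxs, 1):
--             out[i] = f"SPK_{l1}_{st}_{n:04d}"
--     return out
-- ===== Notes on version B (the rewrite author's own statement) =====
-- stated objective: alternative
-- what changed: Replaces A's streamed per-row counter dict with a group-then-scatter pipeline: map rows to normalized keys, build a positions-per-key index, then iterate the groups writing running numbers 1,2,... into a preallocated output list.
import Mathlib
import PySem

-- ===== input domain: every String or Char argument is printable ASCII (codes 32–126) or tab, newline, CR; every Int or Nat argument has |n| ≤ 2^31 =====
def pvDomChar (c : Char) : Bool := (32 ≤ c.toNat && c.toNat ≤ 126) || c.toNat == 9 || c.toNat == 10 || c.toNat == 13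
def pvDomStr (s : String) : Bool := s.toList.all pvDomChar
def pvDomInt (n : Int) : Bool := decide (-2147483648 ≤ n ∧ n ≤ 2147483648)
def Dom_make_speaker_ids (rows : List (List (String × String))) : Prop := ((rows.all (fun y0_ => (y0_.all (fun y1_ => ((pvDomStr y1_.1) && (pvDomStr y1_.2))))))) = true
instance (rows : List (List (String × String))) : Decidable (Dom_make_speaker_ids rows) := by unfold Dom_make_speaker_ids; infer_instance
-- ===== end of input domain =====

-- B replaces A's streamed counter dict with a group-then-scatter pipeline: build a positions-per-key
-- index, then write each group's running numbers into a preallocated output list (alternative, same output).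

-- ===== PORT A =====
-- shared field normalization: (r.get(name) or "").strip() or dflt
def pvNorm (r : List (String × String)) (name dflt : String) : String :=
  let s := PySem.Str.strip (((PySem.Dict.mk r).get? name).getD "")
  if s = "" then dflt else s

def pvKey (r : List (String × String)) : String × String × String :=
  (pvNorm r "primary_language" "UNK", pvNorm r "native_place_state" "UNK", pvNorm r "gender" "U")

-- f"{n:04d}" for the nonnegative counts produced here
def pvPad4 (n : Int) : String :=
  let ds := (PySem.Int.toStr n).toList
  String.ofList (List.replicate (4 - ds.length) '0' ++ ds)

def pvSpk (k : String × String × String) (n : Int) : String :=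
  "SPK_" ++ k.1 ++ "_" ++ k.2.1 ++ "_" ++ pvPad4 n

def make_speaker_ids (rows : List (List (String × String))) : List String :=
  (rows.foldl
    (fun (st : PySem.Dict (String × String × String) Int × List String) r =>
      let key := pvKey r
      let ctr := st.1.modify key 0 (· + 1)
      (ctr, st.2 ++ [pvSpk key (ctr.getD key 0)]))
    ((PySem.Dict.empty : PySem.Dict (String × String × String) Int), ([] : List String))).2

-- ===== PORT B =====
-- groups.setdefault(k, []).append(i)  ==  modify k [] (· ++ [i]) (same dict position, value extended)
def pvGroup (keys : List (String × String × String)) :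
    PySem.Dict (String × String × String) (List Int) :=
  (PySem.List.enumerate keys 0).foldl
    (fun g ik => g.modify ik.2 [] (· ++ [ik.1])) PySem.Dict.empty

-- inner loop 'for n, i in enumerate(idxs, 1): out[i] = ...'; i is a nonnegative in-range
-- position produced by enumerate, so out[i] = v is exactly out.set i.toNat v
def pvScat (k : String × String × String) (s : Int) (idxs : List Int)
    (out : List String) : List String :=
  (PySem.List.enumerate idxs s).foldl (fun o ni => o.set ni.2.toNat (pvSpk k ni.1)) out

def make_speaker_ids_alt (rows : List (List (String × String))) : List String :=
  let keys := rows.map pvKey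
  let groups := pvGroup keys
  groups.items.foldl (fun out e => pvScat e.1 1 e.2 out) (List.replicate keys.length "")

-- ===== PRECONDITION & SPEC =====
def Spec_make_speaker_ids (rows : List (List (String × String))) (out : List String) : Prop := out = make_speaker_ids_alt rows
instance (rows : List (List (String × String))) (out : List String) : Decidable (Spec_make_speaker_ids rows out) := by unfold Spec_make_speaker_ids; infer_instance

-- ===== CLAIM (what is proved, stated in full; the proofs are below) =====
def Claim_equal_make_speaker_ids : Prop := ∀ (rows : List (List (String × String))), Dom_make_speaker_ids rows → Spec_make_speaker_ids rows (make_speaker_ids rows)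

-- ===== LEMMAS AND PROOFS =====

def pvSpec (pre : List (String × String × String)) :
    List (String × String × String) → List String
  | [] => []
  | k :: ks => pvSpk k ((pre.count k : Int) + 1) :: pvSpec (pre ++ [k]) ks


theorem pvA_loop (rows : List (List (String × String)))
    (pre : List (String × String × String)) (acc : List String) :
    (rows.foldl
      (fun (st : PySem.Dict (String × String × String) Int × List String) r =>
        let key := pvKey r
        let ctr := st.1.modify key 0 (· + 1)
        (ctr, st.2 ++ [pvSpk key (ctr.getD key 0)]))
      (PySem.Dict.counter pre, acc)).2 = acc ++ pvSpec pre (rows.map pvKey) := by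
  induction rows generalizing pre acc with
  | nil => simp [pvSpec]
  | cons r rs ih =>
      simp only [List.foldl_cons, List.map_cons, pvSpec]
      rw [show (PySem.Dict.counter pre).modify (pvKey r) 0 (· + 1)
            = PySem.Dict.counter (pre ++ [pvKey r]) from
          (PySem.Dict.counter_append_singleton pre (pvKey r)).symm]
      rw [ih]
      simp [PySem.Dict.getD_counter]


theorem pvGroup_getD (keys : List (String × String × String))
    (c : String × String × String) :
    (pvGroup keys).getD c []
      = ((PySem.List.enumerate keys 0).filter (fun p => p.2 == c)).map (·.1) := by
  have h : pvGroup keys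
      = ((PySem.List.enumerate keys 0).map Prod.swap).foldl
          (fun d p => d.modify p.1 [] (· ++ [p.2])) PySem.Dict.empty := by
    rw [List.foldl_map]; rfl
  rw [h, PySem.Dict.getD_foldl_modify_append]
  simp [List.filter_map, List.map_map, Function.comp_def, Prod.swap]

theorem pvGroup_keys_nodup (keys : List (String × String × String)) :
    (pvGroup keys).keys.Nodup :=
  PySem.Dict.nodup_keys_foldl_modify_key (PySem.List.enumerate keys 0)
    (fun ik => ik.2) [] (fun _ ik => (· ++ [ik.1])) PySem.Dict.empty
    (by simp [PySem.Dict.keys_empty])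

theorem pvGroup_getD_length (keys : List (String × String × String))
    (c : String × String × String) :
    ((pvGroup keys).getD c []).length = keys.count c := by
  rw [pvGroup_getD]
  conv_rhs => rw [← PySem.List.map_snd_enumerate keys 0]
  rw [List.length_map, List.count_eq_countP, ← List.countP_eq_length_filter,
    List.countP_map]
  rfl

theorem pvGroup_getD_bound (keys : List (String × String × String))
    (c : String × String × String) (i : Int) (hi : i ∈ (pvGroup keys).getD c []) :
    0 ≤ i ∧ i.toNat < keys.length := by
  rw [pvGroup_getD] at hi
  obtain ⟨p, hp, rfl⟩ := List.mem_map.mp hi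
  have := List.mem_of_mem_filter hp
  rw [PySem.List.mem_enumerate_iff] at this
  obtain ⟨k, hk, rfl⟩ := this
  simp; omega

theorem pvGroup_items_bound (keys : List (String × String × String))
    (e : (String × String × String) × List Int) (he : e ∈ (pvGroup keys).items)
    (i : Int) (hi : i ∈ e.2) : 0 ≤ i ∧ i.toNat < keys.length := by
  have hd : (pvGroup keys).getD e.1 [] = e.2 := by
    obtain ⟨k, v⟩ := e
    exact PySem.Dict.getD_of_mem_items _ he (pvGroup_keys_nodup keys) []
  exact pvGroup_getD_bound keys e.1 i (hd ▸ hi)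

theorem pvSpec_append (pre xs : List (String × String × String))
    (k : String × String × String) :
    pvSpec pre (xs ++ [k]) = pvSpec pre xs ++ [pvSpk k (((pre ++ xs).count k : Int) + 1)] := by
  induction xs generalizing pre with
  | nil => simp [pvSpec]
  | cons x xs ih =>
      simp only [List.cons_append, pvSpec, ih, List.append_assoc, List.nil_append]

theorem pvScat_length (k : String × String × String) (s : Int) (idxs : List Int)
    (out : List String) : (pvScat k s idxs out).length = out.length := by
  induction idxs generalizing s out with
  | nil => simp [pvScat]
  | cons i is ih =>
      simp only [pvScat, PySem.List.enumerate_cons, List.foldl_cons] at *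
      rw [ih]; simp

theorem pvScat_append_out (k : String × String × String) (s : Int) (idxs : List Int)
    (out t : List String) (h : ∀ i ∈ idxs, i.toNat < out.length) :
    pvScat k s idxs (out ++ t) = pvScat k s idxs out ++ t := by
  induction idxs generalizing s out with
  | nil => simp [pvScat]
  | cons i is ih =>
      simp only [pvScat, PySem.List.enumerate_cons, List.foldl_cons] at *
      rw [List.set_append, if_pos (h i (by simp))]
      exact ih (s+1) (out.set i.toNat (pvSpk k s)) (fun j hj => by
        simpa using h j (by simp [hj]))

theorem pvScat_set_comm (k : String × String × String) (s : Int) (idxs : List Int)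
    (out : List String) (j : Nat) (v : String) (h : ∀ i ∈ idxs, i.toNat ≠ j) :
    pvScat k s idxs (out.set j v) = (pvScat k s idxs out).set j v := by
  induction idxs generalizing s out with
  | nil => simp [pvScat]
  | cons i is ih =>
      simp only [pvScat, PySem.List.enumerate_cons, List.foldl_cons] at *
      rw [List.set_comm _ _ (by exact fun hh => h i (by simp) (by omega))]
      exact ih (s+1) (out.set i.toNat (pvSpk k s)) (fun j' hj' => h j' (by simp [hj']))

theorem pvScat_singleton (k : String × String × String) (s m : Int) (out : List String) :
    pvScat k s [m] out = out.set m.toNat (pvSpk k s) := by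
  simp [pvScat, PySem.List.enumerate_cons]

theorem pvScat_append_idxs (k : String × String × String) (s : Int) (idxs : List Int)
    (m : Int) (out : List String) :
    pvScat k s (idxs ++ [m]) out
      = (pvScat k s idxs out).set m.toNat (pvSpk k (s + idxs.length)) := by
  simp [pvScat, PySem.List.enumerate_append, List.foldl_append, PySem.List.enumerate_cons]

def pvScatAll (es : List ((String × String × String) × List Int)) (out : List String) :
    List String := es.foldl (fun o e => pvScat e.1 1 e.2 o) out

theorem pvScatAll_length (es : List ((String × String × String) × List Int))
    (out : List String) : (pvScatAll es out).length = out.length := by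
  induction es generalizing out with
  | nil => rfl
  | cons e es ih => simp only [pvScatAll, List.foldl_cons] at *; rw [ih, pvScat_length]

theorem pvScatAll_append_out (es : List ((String × String × String) × List Int))
    (out t : List String) (h : ∀ e ∈ es, ∀ i ∈ e.2, i.toNat < out.length) :
    pvScatAll es (out ++ t) = pvScatAll es out ++ t := by
  induction es generalizing out with
  | nil => rfl
  | cons e es ih =>
      simp only [pvScatAll, List.foldl_cons] at *
      rw [pvScat_append_out _ _ _ _ _ (fun i hi => h e (by simp) i hi)]
      exact ih _ (fun e' he' i hi => by rw [pvScat_length]; exact h e' (by simp [he']) i hi)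

theorem pvScatAll_set_comm (es : List ((String × String × String) × List Int))
    (out : List String) (j : Nat) (v : String)
    (h : ∀ e ∈ es, ∀ i ∈ e.2, i.toNat ≠ j) :
    pvScatAll es (out.set j v) = (pvScatAll es out).set j v := by
  induction es generalizing out with
  | nil => rfl
  | cons e es ih =>
      simp only [pvScatAll, List.foldl_cons] at *
      rw [pvScat_set_comm _ _ _ _ _ _ (fun i hi => h e (by simp) i hi)]
      exact ih _ (fun e' he' => h e' (by simp [he']))

-- step: the group index of keys ++ [k]
theorem pvGroup_snoc (ks : List (String × String × String)) (k : String × String × String) :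
    pvGroup (ks ++ [k])
      = (pvGroup ks).insert k ((pvGroup ks).getD k [] ++ [(ks.length : Int)]) := by
  unfold pvGroup
  rw [PySem.List.enumerate_append, List.foldl_append]
  simp [PySem.List.enumerate_cons, PySem.Dict.modify]

theorem pvB_main (keys : List (String × String × String)) :
    pvScatAll (pvGroup keys).items (List.replicate keys.length "")
      = pvSpec [] keys := by
  induction keys using List.reverseRecOn with
  | nil => rfl
  | append_singleton ks k ih =>
      have hnd := pvGroup_keys_nodup ks
      have hbound := pvGroup_items_bound ks
      set G := pvGroup ks with hG
      set n := ks.length with hn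
      have hrep : List.replicate (ks ++ [k]).length ""
          = List.replicate n "" ++ [""] := by
        simp [List.replicate_succ', ← hn]
      rw [pvGroup_snoc, PySem.Dict.items_insert, hrep]
      have hXlen : (pvScatAll G.items (List.replicate n "")).length = n := by
        rw [pvScatAll_length, List.length_replicate]
      by_cases hc : G.contains k = true
      · -- k already has a group: its entry is extended in place
        have hk : k ∈ G.keys := by
          rw [PySem.Dict.contains_eq_decide_mem_keys] at hc; simpa using hc
        obtain ⟨L1, L2, hsplit⟩ := List.append_of_mem hk
        have hnd' : (L1 ++ k :: L2).Nodup := hsplit ▸ hnd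
        have hkL1 : k ∉ L1 := fun hh =>
          (List.disjoint_of_nodup_append hnd') hh (by simp) 
        have hkL2 : k ∉ L2 := (List.nodup_cons.mp (hnd'.of_append_right)).1
        have hitems : G.items
            = L1.map (fun c => (c, G.getD c [])) ++ (k, G.getD k []) ::
              L2.map (fun c => (c, G.getD c [])) := by
          rw [PySem.Dict.items_eq_map_keys G hnd [], hsplit]; simp
        rw [if_pos hc, hitems]
        -- the replacement map touches only the middle entry
        have hmap : (L1.map (fun c => (c, G.getD c [])) ++ (k, G.getD k []) ::
              L2.map (fun c => (c, G.getD c []))).map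
              (fun p => if p.1 == k then (k, G.getD k [] ++ [(n : Int)]) else p)
            = L1.map (fun c => (c, G.getD c [])) ++ (k, G.getD k [] ++ [(n : Int)]) ::
              L2.map (fun c => (c, G.getD c [])) := by
          simp only [List.map_append, List.map_cons, List.map_map]
          congr 1
          · apply List.map_congr_left
            intro c hcL1
            have : ¬ (c == k) = true := by
              simp; rintro rfl; exact hkL1 hcL1
            simp [Function.comp, this]
          · congr 1
            · simp
            · apply List.map_congr_left
              intro c hcL2
              have : ¬ (c == k) = true := by
                simp; rintro rfl; exact hkL2 hcL2
              simp [Function.comp, this]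
        rw [hmap]
        -- scatter; pull the middle entry's trailing write out to the end
        have hbound1 : ∀ e ∈ L1.map (fun c => (c, G.getD c [])), ∀ i ∈ e.2,
            i.toNat < (List.replicate n "" : List String).length := by
          intro e he i hi
          have : e ∈ G.items := by rw [hitems]; simp [he]
          simpa using (hbound e this i hi).2
        have hbound2 : ∀ e ∈ L2.map (fun c => (c, G.getD c [])), ∀ i ∈ e.2,
            i.toNat ≠ n := by
          intro e he i hi
          have : e ∈ G.items := by rw [hitems]; simp [he]
          exact Nat.ne_of_lt (by simpa using (hbound e this i hi).2)
        simp only [pvScatAll, List.foldl_append, List.foldl_cons]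
        rw [pvScat_append_idxs]
        rw [show ((ks.length : Int)).toNat = n from by simp [hn]]
        have := pvScatAll_set_comm (L2.map (fun c => (c, G.getD c [])))
          (pvScat k 1 (G.getD k [])
            (pvScatAll (L1.map (fun c => (c, G.getD c []))) (List.replicate n "" ++ [""])))
          n (pvSpk k (1 + (G.getD k []).length)) hbound2
        simp only [pvScatAll] at this
        rw [this]
        -- now the un-set part is exactly the scatter of G.items over the extended output
        have hrest : (List.foldl (fun o e => pvScat e.1 1 e.2 o)
              (pvScat k 1 (G.getD k [])
                (List.foldl (fun o e => pvScat e.1 1 e.2 o)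
                  (List.replicate n "" ++ [""]) (L1.map (fun c => (c, G.getD c [])))))
              (L2.map (fun c => (c, G.getD c []))))
            = pvScatAll G.items (List.replicate n "") ++ [""] := by
          have : pvScatAll G.items (List.replicate n "" ++ [""])
              = pvScatAll G.items (List.replicate n "") ++ [""] := by
            apply pvScatAll_append_out
            intro e he i hi; simpa using (hbound e he i hi).2
          rw [← this, hitems]
          simp [pvScatAll, List.foldl_append]
        rw [hrest]
        rw [List.set_append, if_neg (by simp [hXlen])]
        rw [show (n - (pvScatAll G.items (List.replicate n "")).length) = 0 from by
          simp [hXlen]]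
        rw [ih, pvSpec_append]
        simp only [List.nil_append, List.set_cons_zero]
        have hlen : (G.getD k []).length = ks.count k := by
          rw [hG]; exact pvGroup_getD_length ks k
        rw [hlen, Int.add_comm 1]
      · -- fresh key: a new singleton group is appended
        rw [if_neg hc]
        have hgetD : G.getD k [] = [] := by
          have h0 : G.get? k = none :=
            (PySem.Dict.get?_eq_none_iff_contains G k).mpr (by simpa using hc)
          simp [PySem.Dict.getD, h0]
        rw [hgetD]
        simp only [pvScatAll, List.foldl_append, List.foldl_cons, List.foldl_nil,
          List.nil_append]
        have hsc : pvScatAll G.items (List.replicate n "" ++ [""])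
            = pvScatAll G.items (List.replicate n "") ++ [""] := by
          apply pvScatAll_append_out
          intro e he i hi; simpa using (hbound e he i hi).2
        simp only [pvScatAll] at hsc
        rw [hsc, pvScat_singleton]
        rw [show ((ks.length : Int)).toNat = n from by simp [hn]]
        rw [List.set_append, if_neg (by simp [show (List.foldl (fun o e => pvScat e.1 1 e.2 o) (List.replicate n "") G.items).length = n from hXlen])]
        rw [show (n - (List.foldl (fun o e => pvScat e.1 1 e.2 o) (List.replicate n "") G.items).length) = 0 from by
          simp [show (List.foldl (fun o e => pvScat e.1 1 e.2 o) (List.replicate n "") G.items).length = n from hXlen]]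
        rw [show (List.foldl (fun o e => pvScat e.1 1 e.2 o) (List.replicate n "") G.items) = pvSpec [] ks from ih]
        rw [pvSpec_append]
        simp only [List.nil_append, List.set_cons_zero]
        have hcnt : ks.count k = 0 := by
          rw [← pvGroup_getD_length ks k, ← hG, hgetD]; rfl
        simp [hcnt]

-- ===== VERDICT (by name: the statement is the Claim_ definition above) =====
theorem make_speaker_ids_spec : Claim_equal_make_speaker_ids := by
  intro rows _
  show make_speaker_ids rows = make_speaker_ids_alt rows
  unfold make_speaker_ids make_speaker_ids_alt
  have hc : (PySem.Dict.empty : PySem.Dict (String × String × String) Int)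
      = PySem.Dict.counter ([] : List (String × String × String)) := rfl
  rw [hc, pvA_loop rows [] []]
  have := pvB_main (rows.map pvKey)
  simp only [List.length_map, List.nil_append] at this ⊢
  rw [← this]; rfl
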